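-- pv_equiv track=rewrite | github.com/domaincrush/astro | ATBackend/server/dynamic_analysis_engine.py | get_spouse_traits_from_7th_house_planets
-- ===== SOURCE A (Python) =====
-- def get_spouse_traits_from_7th_house_planets(positions):
--     """Get spouse characteristics from 7th house planets"""
--     try:
--         seventh_house_planets = []
--         for planet, data in positions.items():
--             if isinstance(data, dict) and data.get('house') == 7:
--                 seventh_house_planets.append(planet)
--
--         if 'Jupiter' in seventh_house_planets:
--             return "Wise, educated, spiritual, and family-oriented life partner"
--         elif 'Venus' in seventh_house_planets:
--             return "Beautiful, artistic, loving, and harmony-seeking partner"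
--         elif 'Mercury' in seventh_house_planets:
--             return "Intelligent, communicative, and adaptable partner"
--         else:
--             return "Intelligent, well-educated, family-oriented partner"
--     except:
--         return "Intelligent, well-educated, family-oriented, career-minded partner"
-- ===== SOURCE B (Python) =====
-- _TRAITS = [
--     ("Jupiter", "Wise, educated, spiritual, and family-oriented life partner"),
--     ("Venus", "Beautiful, artistic, loving, and harmony-seeking partner"),
--     ("Mercury", "Intelligent, communicative, and adaptable partner"),
-- ]
--
-- def get_spouse_traits_from_7th_house_planets(positions):
--     """Get spouse characteristics from 7th house planets"""
--     try:
--         for name, trait in _TRAITS: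
--             if any(planet == name and isinstance(data, dict) and data.get('house') == 7
--                    for planet, data in positions.items()):
--                 return trait
--         return "Intelligent, well-educated, family-oriented partner"
--     except:
--         return "Intelligent, well-educated, family-oriented, career-minded partner"
-- ===== Notes on version B (the rewrite author's own statement) =====
-- stated objective: alternative
-- what changed: Instead of building the list of all 7th-house planets and then testing membership in a hard-coded if/elif chain, B drives the decision from a priority table of (planet, trait) pairs and scans positions once per candidate, returning the first trait whose planet sits in the 7th house.
import Mathlib
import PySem

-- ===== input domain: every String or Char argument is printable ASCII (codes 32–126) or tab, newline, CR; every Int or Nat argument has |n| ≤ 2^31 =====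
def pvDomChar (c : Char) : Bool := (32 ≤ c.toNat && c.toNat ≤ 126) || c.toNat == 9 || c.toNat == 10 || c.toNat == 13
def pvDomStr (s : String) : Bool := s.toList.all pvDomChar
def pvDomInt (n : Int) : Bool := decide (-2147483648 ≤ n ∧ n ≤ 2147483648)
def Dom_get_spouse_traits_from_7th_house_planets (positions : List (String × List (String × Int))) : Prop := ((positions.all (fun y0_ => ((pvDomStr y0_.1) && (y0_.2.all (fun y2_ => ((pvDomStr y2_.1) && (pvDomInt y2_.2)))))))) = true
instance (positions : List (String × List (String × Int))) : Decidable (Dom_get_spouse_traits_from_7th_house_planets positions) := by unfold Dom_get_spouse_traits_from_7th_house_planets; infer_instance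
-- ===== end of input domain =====

-- B replaces A's collect-then-membership-chain with a priority table of (planet, trait)
-- pairs scanned in order (objective: alternative decomposition, same cost).

-- shared primitive: Python dict.get(k) on an association list (first match)
def pyDictGetInt (d : List (String × Int)) (k : String) : Option Int :=
  (d.find? (fun kv => kv.1 == k)).map Prod.snd

-- ===== PORT A =====
def get_spouse_traits_from_7th_house_planets (positions : List (String × List (String × Int))) : String :=
  -- try/except: no operation below can raise on this input type, so the except arm is dead
  let seventh_house_planets : List String :=
    positions.foldl
      (fun acc pd => if pyDictGetInt pd.2 "house" = some 7 then acc ++ [pd.1] else acc) []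
  if "Jupiter" ∈ seventh_house_planets then
    "Wise, educated, spiritual, and family-oriented life partner"
  else if "Venus" ∈ seventh_house_planets then
    "Beautiful, artistic, loving, and harmony-seeking partner"
  else if "Mercury" ∈ seventh_house_planets then
    "Intelligent, communicative, and adaptable partner"
  else
    "Intelligent, well-educated, family-oriented partner"

-- ===== PORT B =====
def spouseTraitsTable : List (String × String) :=
  [("Jupiter", "Wise, educated, spiritual, and family-oriented life partner"),
   ("Venus", "Beautiful, artistic, loving, and harmony-seeking partner"),
   ("Mercury", "Intelligent, communicative, and adaptable partner")]

-- any(planet == name and data.get('house') == 7 for planet, data in positions.items())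
def inSeventhHouse (positions : List (String × List (String × Int))) (name : String) : Bool :=
  positions.any (fun pd => pd.1 == name && pyDictGetInt pd.2 "house" == some 7)

def spouseTraitsLoop (positions : List (String × List (String × Int))) :
    List (String × String) → String
  | [] => "Intelligent, well-educated, family-oriented partner"
  | (name, trait) :: rest =>
      if inSeventhHouse positions name then trait else spouseTraitsLoop positions rest

def get_spouse_traits_from_7th_house_planets_alt (positions : List (String × List (String × Int))) : String :=
  spouseTraitsLoop positions spouseTraitsTable

-- ===== PRECONDITION & SPEC =====
def Spec_get_spouse_traits_from_7th_house_planets (positions : List (String × List (String × Int))) (out : String) : Prop := out = get_spouse_traits_from_7th_house_planets_alt positions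
instance (positions : List (String × List (String × Int))) (out : String) : Decidable (Spec_get_spouse_traits_from_7th_house_planets positions out) := by unfold Spec_get_spouse_traits_from_7th_house_planets; infer_instance

-- ===== CLAIM (what is proved, stated in full; the proofs are below) =====
def Claim_equal_get_spouse_traits_from_7th_house_planets : Prop := ∀ (positions : List (String × List (String × Int))), Dom_get_spouse_traits_from_7th_house_planets positions → Spec_get_spouse_traits_from_7th_house_planets positions (get_spouse_traits_from_7th_house_planets positions)

-- ===== LEMMAS AND PROOFS =====

lemma mem_fold_seventh (positions : List (String × List (String × Int)))
    (acc : List String) (x : String) :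
    x ∈ positions.foldl
      (fun acc pd => if pyDictGetInt pd.2 "house" = some 7 then acc ++ [pd.1] else acc) acc ↔
    x ∈ acc ∨ ∃ pd ∈ positions, pd.1 = x ∧ pyDictGetInt pd.2 "house" = some 7 := by
  induction positions generalizing acc with
  | nil => simp
  | cons hd tl ih =>
    simp only [List.foldl_cons, ih]
    by_cases h : pyDictGetInt hd.2 "house" = some 7 <;> simp [h, List.mem_append] <;> try tauto

lemma inSeventhHouse_iff (positions : List (String × List (String × Int))) (name : String) :
    inSeventhHouse positions name = true ↔
    ∃ pd ∈ positions, pd.1 = name ∧ pyDictGetInt pd.2 "house" = some 7 := by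
  simp only [inSeventhHouse, List.any_eq_true, Bool.and_eq_true, beq_iff_eq]

-- ===== VERDICT (by name: the statement is the Claim_ definition above) =====
theorem get_spouse_traits_from_7th_house_planets_spec : Claim_equal_get_spouse_traits_from_7th_house_planets := by
  intro positions _
  unfold Spec_get_spouse_traits_from_7th_house_planets
  unfold get_spouse_traits_from_7th_house_planets get_spouse_traits_from_7th_house_planets_alt
  unfold spouseTraitsTable
  simp only [spouseTraitsLoop]
  by_cases hJ : inSeventhHouse positions "Jupiter" <;>
  by_cases hV : inSeventhHouse positions "Venus" <;>
  by_cases hM : inSeventhHouse positions "Mercury" <;>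
    simp only [hJ, hV, hM, if_true, if_false, Bool.false_eq_true] <;>
    · rw [inSeventhHouse_iff] at hJ hV hM
      simp only [mem_fold_seventh, List.not_mem_nil, false_or]
      simp [hJ, hV, hM]
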